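-- pv_equiv track=rewrite | github.com/XUNZI1314/ML | build_pocket_evidence.py | _canonical_source_cells
-- ===== SOURCE A (Python) =====
-- from typing import Any, Iterable
--
-- SOURCE_TEMPLATE_COLUMNS = [
--     "residue_key",
--     "evidence_role",
--     "source_kind",
--     "paper_title",
--     "pmid",
--     "doi",
--     "uniprot_id",
--     "uniprot_feature",
--     "mcsa_id",
--     "pdb_id",
--     "source_url",
--     "source_sentence",
--     "evidence_level",
--     "ai_model",
--     "ai_prompt_id",
--     "ai_extraction_confidence",
--     "curator",
--     "review_status",
--     "manual_note",
-- ]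
--
-- SOURCE_TABLE_ALIASES = {
--     "residue_key": ("residue_key", "residue", "residue_id", "site", "residue_site"),
--     "chain_id": ("chain_id", "chain", "chainid"),
--     "resseq": ("resseq", "residue_number", "resnum", "res_no", "position", "aa_position"),
--     "icode": ("icode", "insertion_code", "ins_code"),
--     "evidence_role": ("evidence_role", "role", "evidence_type"),
--     "source_kind": ("source_kind", "source_category", "source_type", "source"),
--     "paper_title": ("paper_title", "paper", "title", "article_title"),
--     "pmid": ("pmid", "pubmed", "pubmed_id"),
--     "doi": ("doi",),
--     "uniprot_id": ("uniprot_id", "uniprot", "accession"),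
--     "uniprot_feature": ("uniprot_feature", "feature", "annotation"),
--     "mcsa_id": ("mcsa_id", "m_csa", "mcsa"),
--     "pdb_id": ("pdb_id", "pdb"),
--     "source_url": ("source_url", "url", "link"),
--     "source_sentence": ("source_sentence", "evidence_sentence", "sentence", "quote", "excerpt"),
--     "evidence_level": ("evidence_level", "level", "confidence"),
--     "ai_model": ("ai_model", "model", "llm_model"),
--     "ai_prompt_id": ("ai_prompt_id", "prompt_id", "prompt_version"),
--     "ai_extraction_confidence": ("ai_extraction_confidence", "ai_confidence", "extraction_confidence"),
--     "curator": ("curator", "reviewer", "annotator"),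
--     "review_status": ("review_status", "status", "manual_status"),
--     "manual_note": ("manual_note", "note", "notes", "comment", "comments", "remark"),
-- }
--
-- def _normalize_source_column(column: str) -> str:
--     text = str(column).strip().lstrip("\ufeff").lower()
--     normalized = "".join(ch if ch.isalnum() else "_" for ch in text)
--     return "_".join(part for part in normalized.split("_") if part)
--
-- def _canonical_source_cells(raw: dict[str, Any]) -> dict[str, str]:
--     normalized_raw = {_normalize_source_column(key): "" if value is None else str(value).strip() for key, value in raw.items()}
--     cells: dict[str, str] = {column: "" for column in SOURCE_TEMPLATE_COLUMNS}
--     cells.update({"chain_id": "", "resseq": "", "icode": ""})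
--     for canonical_name, aliases in SOURCE_TABLE_ALIASES.items():
--         for alias in aliases:
--             value = normalized_raw.get(_normalize_source_column(alias), "")
--             if value:
--                 cells[canonical_name] = value
--                 break
--     return cells
-- ===== SOURCE B (Python) =====
-- from typing import Any
--
-- _OUTPUT_COLUMNS = [
--     "residue_key",
--     "evidence_role",
--     "source_kind",
--     "paper_title",
--     "pmid",
--     "doi",
--     "uniprot_id",
--     "uniprot_feature",
--     "mcsa_id",
--     "pdb_id",
--     "source_url",
--     "source_sentence",
--     "evidence_level",
--     "ai_model",
--     "ai_prompt_id",
--     "ai_extraction_confidence",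
--     "curator",
--     "review_status",
--     "manual_note",
--     "chain_id",
--     "resseq",
--     "icode",
-- ]
--
-- _ALIAS_INDEX = {  # inverted SOURCE_TABLE_ALIASES: normalized alias -> (canonical column, priority)
--     "residue_key": ("residue_key", 0),
--     "residue": ("residue_key", 1),
--     "residue_id": ("residue_key", 2),
--     "site": ("residue_key", 3),
--     "residue_site": ("residue_key", 4),
--     "chain_id": ("chain_id", 0),
--     "chain": ("chain_id", 1),
--     "chainid": ("chain_id", 2),
--     "resseq": ("resseq", 0),
--     "residue_number": ("resseq", 1),
--     "resnum": ("resseq", 2),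
--     "res_no": ("resseq", 3),
--     "position": ("resseq", 4),
--     "aa_position": ("resseq", 5),
--     "icode": ("icode", 0),
--     "insertion_code": ("icode", 1),
--     "ins_code": ("icode", 2),
--     "evidence_role": ("evidence_role", 0),
--     "role": ("evidence_role", 1),
--     "evidence_type": ("evidence_role", 2),
--     "source_kind": ("source_kind", 0),
--     "source_category": ("source_kind", 1),
--     "source_type": ("source_kind", 2),
--     "source": ("source_kind", 3),
--     "paper_title": ("paper_title", 0),
--     "paper": ("paper_title", 1),
--     "title": ("paper_title", 2),
--     "article_title": ("paper_title", 3),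
--     "pmid": ("pmid", 0),
--     "pubmed": ("pmid", 1),
--     "pubmed_id": ("pmid", 2),
--     "doi": ("doi", 0),
--     "uniprot_id": ("uniprot_id", 0),
--     "uniprot": ("uniprot_id", 1),
--     "accession": ("uniprot_id", 2),
--     "uniprot_feature": ("uniprot_feature", 0),
--     "feature": ("uniprot_feature", 1),
--     "annotation": ("uniprot_feature", 2),
--     "mcsa_id": ("mcsa_id", 0),
--     "m_csa": ("mcsa_id", 1),
--     "mcsa": ("mcsa_id", 2),
--     "pdb_id": ("pdb_id", 0),
--     "pdb": ("pdb_id", 1),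
--     "source_url": ("source_url", 0),
--     "url": ("source_url", 1),
--     "link": ("source_url", 2),
--     "source_sentence": ("source_sentence", 0),
--     "evidence_sentence": ("source_sentence", 1),
--     "sentence": ("source_sentence", 2),
--     "quote": ("source_sentence", 3),
--     "excerpt": ("source_sentence", 4),
--     "evidence_level": ("evidence_level", 0),
--     "level": ("evidence_level", 1),
--     "confidence": ("evidence_level", 2),
--     "ai_model": ("ai_model", 0),
--     "model": ("ai_model", 1),
--     "llm_model": ("ai_model", 2),
--     "ai_prompt_id": ("ai_prompt_id", 0),
--     "prompt_id": ("ai_prompt_id", 1),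
--     "prompt_version": ("ai_prompt_id", 2),
--     "ai_extraction_confidence": ("ai_extraction_confidence", 0),
--     "ai_confidence": ("ai_extraction_confidence", 1),
--     "extraction_confidence": ("ai_extraction_confidence", 2),
--     "curator": ("curator", 0),
--     "reviewer": ("curator", 1),
--     "annotator": ("curator", 2),
--     "review_status": ("review_status", 0),
--     "status": ("review_status", 1),
--     "manual_status": ("review_status", 2),
--     "manual_note": ("manual_note", 0),
--     "note": ("manual_note", 1),
--     "notes": ("manual_note", 2),
--     "comment": ("manual_note", 3),
--     "comments": ("manual_note", 4),
--     "remark": ("manual_note", 5),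
-- }
--
-- def _normalize_source_column(column: str) -> str:
--     text = str(column).strip().lstrip("\ufeff").lower()
--     normalized = "".join(ch if ch.isalnum() else "_" for ch in text)
--     return "_".join(part for part in normalized.split("_") if part)
--
--
-- def _canonical_source_cells(raw: dict[str, Any]) -> dict[str, str]:
--     normalized_raw = {_normalize_source_column(key): "" if value is None else str(value).strip() for key, value in raw.items()}
--     cells = {column: "" for column in _OUTPUT_COLUMNS}
--     best: dict[str, int] = {}
--     for key, value in normalized_raw.items():
--         if not value:
--             continue
--         hit = _ALIAS_INDEX.get(key)
--         if hit is None: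
--             continue
--         canonical, priority = hit
--         if canonical not in best or priority < best[canonical]:
--             best[canonical] = priority
--             cells[canonical] = value
--     return cells
-- ===== Notes on version B (the rewrite author's own statement) =====
-- stated objective: alternative
-- what changed: B stores the alias table inverted as a flat literal dict mapping each normalized alias to (canonical column, priority) and fills the cells in one pass over the normalized raw items, keeping per canonical the value of the lowest-priority alias, instead of A's loop over canonicals that scans each alias tuple with a dict lookup per alias.
import Mathlib
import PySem

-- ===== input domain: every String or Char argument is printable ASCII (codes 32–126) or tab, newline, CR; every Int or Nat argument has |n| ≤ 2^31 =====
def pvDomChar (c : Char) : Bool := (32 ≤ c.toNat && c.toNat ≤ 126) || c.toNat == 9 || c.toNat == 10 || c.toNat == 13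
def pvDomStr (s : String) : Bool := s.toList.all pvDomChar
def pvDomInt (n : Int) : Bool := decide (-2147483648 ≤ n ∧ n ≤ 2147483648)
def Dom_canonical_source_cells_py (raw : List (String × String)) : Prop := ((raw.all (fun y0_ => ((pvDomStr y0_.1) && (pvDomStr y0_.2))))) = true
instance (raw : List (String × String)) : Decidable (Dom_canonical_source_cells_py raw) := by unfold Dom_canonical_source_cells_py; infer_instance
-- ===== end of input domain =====

-- B stores the alias mapping inverted — a flat literal dict normalized-alias -> (canonical, priority) —
-- and fills the cells in ONE pass over the normalized raw items, keeping per canonical the value of the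
-- lowest-priority alias, instead of A's per-canonical scan over the nested alias tuples; objective: alternative.

-- ===== PORT A =====
def sourceTemplateColumns : List String :=
  ["residue_key", "evidence_role", "source_kind", "paper_title", "pmid", "doi",
   "uniprot_id", "uniprot_feature", "mcsa_id", "pdb_id", "source_url", "source_sentence",
   "evidence_level", "ai_model", "ai_prompt_id", "ai_extraction_confidence", "curator",
   "review_status", "manual_note"]

def sourceTableAliases : List (String × List String) :=
  [("residue_key", ["residue_key", "residue", "residue_id", "site", "residue_site"]),
   ("chain_id", ["chain_id", "chain", "chainid"]),
   ("resseq", ["resseq", "residue_number", "resnum", "res_no", "position", "aa_position"]),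
   ("icode", ["icode", "insertion_code", "ins_code"]),
   ("evidence_role", ["evidence_role", "role", "evidence_type"]),
   ("source_kind", ["source_kind", "source_category", "source_type", "source"]),
   ("paper_title", ["paper_title", "paper", "title", "article_title"]),
   ("pmid", ["pmid", "pubmed", "pubmed_id"]),
   ("doi", ["doi"]),
   ("uniprot_id", ["uniprot_id", "uniprot", "accession"]),
   ("uniprot_feature", ["uniprot_feature", "feature", "annotation"]),
   ("mcsa_id", ["mcsa_id", "m_csa", "mcsa"]),
   ("pdb_id", ["pdb_id", "pdb"]),
   ("source_url", ["source_url", "url", "link"]),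
   ("source_sentence", ["source_sentence", "evidence_sentence", "sentence", "quote", "excerpt"]),
   ("evidence_level", ["evidence_level", "level", "confidence"]),
   ("ai_model", ["ai_model", "model", "llm_model"]),
   ("ai_prompt_id", ["ai_prompt_id", "prompt_id", "prompt_version"]),
   ("ai_extraction_confidence", ["ai_extraction_confidence", "ai_confidence", "extraction_confidence"]),
   ("curator", ["curator", "reviewer", "annotator"]),
   ("review_status", ["review_status", "status", "manual_status"]),
   ("manual_note", ["manual_note", "note", "notes", "comment", "comments", "remark"])]

-- _normalize_source_column (used by both Pythons, textually identical); split("_") has a nonempty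
-- literal separator so split? is `some`; .lstrip("\ufeff") with the single strip-char U+FEFF is ported
-- by hand as dropWhile (· == '\ufeff'), exact for a one-character chars argument.
def pyNormCol (column : String) : String :=
  let text := PySem.Str.lower (String.ofList ((PySem.Str.strip column).toList.dropWhile (· == '\ufeff')))
  let normalized := PySem.Str.join "" (text.toList.map (fun ch => if PySem.Chars.isalnum ch then String.ofList [ch] else "_"))
  PySem.Str.join "_" (((PySem.Str.split? normalized "_").getD []).filter (fun part => part ≠ ""))

-- the normalized_raw dict comprehension (textually identical in A and in B; value is a str here,
-- so the `is None` branch never fires and str(value) is the identity)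
def normRawOf (raw : List (String × String)) : PySem.Dict String String :=
  raw.foldl (fun d kv => d.insert (pyNormCol kv.1) (PySem.Str.strip kv.2)) PySem.Dict.empty

-- A: cells = {column: "" ...}; cells.update({"chain_id": "", "resseq": "", "icode": ""})
def cellsInit : PySem.Dict String String :=
  (((sourceTemplateColumns.foldl (fun d c => d.insert c "") PySem.Dict.empty).insert
    "chain_id" "").insert "resseq" "").insert "icode" ""

-- A's inner `for alias in aliases: ... break` loop
def pickAlias (d : PySem.Dict String String) : List String → Option String
  | [] => none
  | a :: rest =>
    let value := d.getD (pyNormCol a) ""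
    if value ≠ "" then some value else pickAlias d rest

def canonical_source_cells_py (raw : List (String × String)) : List (String × String) :=
  let normalized_raw := normRawOf raw
  (sourceTableAliases.foldl (fun cells p =>
      match pickAlias normalized_raw p.2 with
      | some value => cells.insert p.1 value
      | none => cells) cellsInit).items

-- ===== PORT B =====
-- Source B's _OUTPUT_COLUMNS literal
def outputColumnsB : List String :=
  ["residue_key", "evidence_role", "source_kind", "paper_title", "pmid", "doi", "uniprot_id", "uniprot_feature", "mcsa_id", "pdb_id", "source_url", "source_sentence", "evidence_level", "ai_model", "ai_prompt_id", "ai_extraction_confidence", "curator", "review_status", "manual_note", "chain_id", "resseq", "icode"]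

-- Source B's _ALIAS_INDEX dict literal (the alias table stored inverted, keys already normalized)
def revRows : List (String × (String × Int)) :=
  [("residue_key", ("residue_key", 0)), ("residue", ("residue_key", 1)), ("residue_id", ("residue_key", 2)), ("site", ("residue_key", 3)), ("residue_site", ("residue_key", 4)), ("chain_id", ("chain_id", 0)), ("chain", ("chain_id", 1)), ("chainid", ("chain_id", 2)), ("resseq", ("resseq", 0)), ("residue_number", ("resseq", 1)), ("resnum", ("resseq", 2)), ("res_no", ("resseq", 3)), ("position", ("resseq", 4)), ("aa_position", ("resseq", 5)), ("icode", ("icode", 0)), ("insertion_code", ("icode", 1)), ("ins_code", ("icode", 2)), ("evidence_role", ("evidence_role", 0)), ("role", ("evidence_role", 1)), ("evidence_type", ("evidence_role", 2)), ("source_kind", ("source_kind", 0)), ("source_category", ("source_kind", 1)), ("source_type", ("source_kind", 2)), ("source", ("source_kind", 3)), ("paper_title", ("paper_title", 0)), ("paper", ("paper_title", 1)), ("title", ("paper_title", 2)), ("article_title", ("paper_title", 3)), ("pmid", ("pmid", 0)), ("pubmed", ("pmid", 1)), ("pubmed_id", ("pmid", 2)), ("doi", ("doi", 0)), ("uniprot_id",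 ("uniprot_id", 0)), ("uniprot", ("uniprot_id", 1)), ("accession", ("uniprot_id", 2)), ("uniprot_feature", ("uniprot_feature", 0)), ("feature", ("uniprot_feature", 1)), ("annotation", ("uniprot_feature", 2)), ("mcsa_id", ("mcsa_id", 0)), ("m_csa", ("mcsa_id", 1)), ("mcsa", ("mcsa_id", 2)), ("pdb_id", ("pdb_id", 0)), ("pdb", ("pdb_id", 1)), ("source_url", ("source_url", 0)), ("url", ("source_url", 1)), ("link", ("source_url", 2)), ("source_sentence", ("source_sentence", 0)), ("evidence_sentence", ("source_sentence", 1)), ("sentence", ("source_sentence", 2)), ("quote", ("source_sentence", 3)), ("excerpt", ("source_sentence", 4)), ("evidence_level", ("evidence_level", 0)), ("level", ("evidence_level", 1)), ("confidence", ("evidence_level", 2)), ("ai_model", ("ai_model", 0)), ("model", ("ai_model", 1)), ("llm_model", ("ai_model", 2)), ("ai_prompt_id", ("ai_prompt_id", 0)), ("prompt_id", ("ai_prompt_id", 1)), ("prompt_version", ("ai_prompt_id", 2)), ("ai_extraction_confidence", ("ai_extraction_confidence", 0)), ("ai_confidence", ("ai_extraction_confidence", 1)), ("extraction_confidence", ("ai_extraction_confidence",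 2)), ("curator", ("curator", 0)), ("reviewer", ("curator", 1)), ("annotator", ("curator", 2)), ("review_status", ("review_status", 0)), ("status", ("review_status", 1)), ("manual_status", ("review_status", 2)), ("manual_note", ("manual_note", 0)), ("note", ("manual_note", 1)), ("notes", ("manual_note", 2)), ("comment", ("manual_note", 3)), ("comments", ("manual_note", 4)), ("remark", ("manual_note", 5))]

def aliasIndexB : PySem.Dict String (String × Int) := PySem.Dict.mk revRows

-- B: cells = {column: "" for column in _OUTPUT_COLUMNS}
def cellsB : PySem.Dict String String :=
  outputColumnsB.foldl (fun d c => d.insert c "") PySem.Dict.empty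

-- the body of B's single pass: state = (cells, best)
def bStep (st : PySem.Dict String String × PySem.Dict String Int) (kv : String × String) :
    PySem.Dict String String × PySem.Dict String Int :=
  if kv.2 = "" then st
  else
    match aliasIndexB.get? kv.1 with
    | none => st
    | some (c, i) =>
      match st.2.get? c with
      | none => (st.1.insert c kv.2, st.2.insert c i)
      | some j => if i < j then (st.1.insert c kv.2, st.2.insert c i) else st

def canonical_source_cells_py_alt (raw : List (String × String)) : List (String × String) :=
  let normalized_raw := normRawOf raw
  ((normalized_raw.items.foldl bStep (cellsB, PySem.Dict.empty)).1).items

-- ===== PRECONDITION & SPEC =====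
def Spec_canonical_source_cells_py (raw : List (String × String)) (out : List (String × String)) : Prop := out = canonical_source_cells_py_alt raw
instance (raw : List (String × String)) (out : List (String × String)) : Decidable (Spec_canonical_source_cells_py raw out) := by unfold Spec_canonical_source_cells_py; infer_instance

-- ===== CLAIM (what is proved, stated in full; the proofs are below) =====
def Claim_equal_canonical_source_cells_py : Prop := ∀ (raw : List (String × String)), Dom_canonical_source_cells_py raw → Spec_canonical_source_cells_py raw (canonical_source_cells_py raw)

-- ===== LEMMAS AND PROOFS =====

def cellsLit : List (String × String) :=
  [("residue_key", ""), ("evidence_role", ""), ("source_kind", ""), ("paper_title", ""), ("pmid", ""), ("doi", ""), ("uniprot_id", ""), ("uniprot_feature", ""), ("mcsa_id", ""), ("pdb_id", ""), ("source_url", ""), ("source_sentence", ""), ("evidence_level", ""), ("ai_model", ""), ("ai_prompt_id", ""), ("ai_extraction_confidence", ""), ("curator", ""), ("review_status", ""), ("manual_note", ""), ("chain_id", ""), ("resseq", ""), ("icode", "")]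

-- first entry of the alias table with the given canonical name
def tblFind : List (String × List String) → String → Option (List String)
  | [], _ => none
  | p :: rest, c => if p.1 = c then some p.2 else tblFind rest c

-- A's outer loop, generalized over the table for induction
def aloop (d : PySem.Dict String String) (tbl : List (String × List String))
    (cells : PySem.Dict String String) : PySem.Dict String String :=
  tbl.foldl (fun cells p =>
    match pickAlias d p.2 with
    | some value => cells.insert p.1 value
    | none => cells) cells

-- the contribution of one normalized-raw item to canonical c in B's pass
def hitOf (c : String) (kv : String × String) : Option (Int × String) :=
  if kv.2 = "" then none
  else
    match aliasIndexB.get? kv.1 with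
    | none => none
    | some (c', i) => if c' = c then some (i, kv.2) else none

def updMin (acc : Option (Int × String)) (i : Int) (v : String) : Option (Int × String) :=
  match acc with
  | none => some (i, v)
  | some (j, _) => if i < j then some (i, v) else acc

-- the per-canonical residue of B's joint fold
def bres (l : List (String × String)) (c : String) (acc : Option (Int × String)) : Option (Int × String) :=
  l.foldl (fun acc kv => match hitOf c kv with | some (i, v) => updMin acc i v | none => acc) acc

-- concrete facts about the fixed tables (kernel-evaluated once on the literal forms)

set_option maxRecDepth 10000 in
lemma cellsInit_eq : cellsInit = PySem.Dict.mk cellsLit := by decide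

set_option maxRecDepth 10000 in
lemma cellsB_eq : cellsB = PySem.Dict.mk cellsLit := by decide

set_option maxRecDepth 10000 in
lemma rev_complete : ∀ p ∈ sourceTableAliases, ∀ j ∈ List.range p.2.length,
    aliasIndexB.get? (pyNormCol (p.2.getD j "")) = some (p.1, (j : Int)) := by decide

set_option maxRecDepth 10000 in
lemma aliasIndexB_items : aliasIndexB.items = revRows := by decide

set_option maxRecDepth 10000 in
lemma rev_sound : ∀ q ∈ revRows, q.2.1 ∈ cellsLit.map Prod.fst ∧ tblFind sourceTableAliases q.2.1 ≠ none := by decide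

set_option maxRecDepth 10000 in
lemma rev_decode : ∀ q ∈ revRows, ∀ p ∈ sourceTableAliases, q.2.1 = p.1 →
    ∃ j ∈ List.range p.2.length, q.2.2 = (j : Int) ∧ q.1 = pyNormCol (p.2.getD j "") := by decide

lemma tbl_nodup : (sourceTableAliases.map Prod.fst).Nodup := by decide
lemma cells_keys_nodup : (cellsLit.map Prod.fst).Nodup := by decide
lemma tbl_keys_in_cells : ∀ p ∈ sourceTableAliases, p.1 ∈ cellsLit.map Prod.fst := by decide

lemma cellsInit_keys : cellsInit.keys = cellsLit.map Prod.fst := by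
  rw [cellsInit_eq]; rfl

lemma cellsB_keys : cellsB.keys = cellsLit.map Prod.fst := by
  rw [cellsB_eq]; rfl

lemma cellsB_get?_eq (k : String) : cellsB.get? k = cellsInit.get? k := by
  rw [cellsB_eq, cellsInit_eq]

lemma tblFind_mem {tbl : List (String × List String)} {c : String} {as : List String}
    (h : tblFind tbl c = some as) : (c, as) ∈ tbl := by
  induction tbl with
  | nil => simp [tblFind] at h
  | cons p rest ih =>
    obtain ⟨p1, p2⟩ := p
    by_cases hp : p1 = c
    · simp only [tblFind, if_pos hp] at h
      injection h with h2
      subst h2; subst hp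
      exact List.mem_cons_self
    · simp only [tblFind, if_neg hp] at h
      exact List.mem_cons_of_mem _ (ih h)

-- ===== A-side characterization =====

lemma tblFind_eq_none {tbl : List (String × List String)} {c : String}
    (h : c ∉ tbl.map Prod.fst) : tblFind tbl c = none := by
  induction tbl with
  | nil => rfl
  | cons p rest ih =>
    simp only [List.map_cons, List.mem_cons, not_or] at h
    have hne : p.1 ≠ c := fun he => h.1 he.symm
    simp [tblFind, hne, ih h.2]

lemma aloop_get? (d : PySem.Dict String String) (tbl : List (String × List String))
    (cells : PySem.Dict String String) (hnd : (tbl.map Prod.fst).Nodup) (k : String) :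
    (aloop d tbl cells).get? k =
      match tblFind tbl k with
      | some as => (match pickAlias d as with | some v => some v | none => cells.get? k)
      | none => cells.get? k := by
  induction tbl generalizing cells with
  | nil => simp [aloop, tblFind]
  | cons p rest ih =>
    rw [List.map_cons] at hnd
    rcases List.nodup_cons.mp hnd with ⟨hp, hnd'⟩
    have hstep : aloop d (p :: rest) cells =
        aloop d rest (match pickAlias d p.2 with
          | some value => cells.insert p.1 value
          | none => cells) := rfl
    rw [hstep, ih _ hnd']
    by_cases hk : p.1 = k
    · subst hk
      rw [tblFind_eq_none hp]
      simp only [tblFind, if_pos rfl]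
      cases hpk : pickAlias d p.2 with
      | none => simp [hpk]
      | some v => simp [hpk, PySem.Dict.get?_insert_self]
    · simp only [tblFind, if_neg hk]
      cases hfr : tblFind rest k with
      | none =>
        simp only [hfr]
        cases hpk : pickAlias d p.2 with
        | none => simp [hpk]
        | some v => simp [hpk, PySem.Dict.get?_insert_of_ne _ _ (Ne.symm hk)]
      | some as =>
        simp only [hfr]
        cases hpa : pickAlias d as with
        | some v => simp [hpa]
        | none =>
          simp only [hpa]
          cases hpk : pickAlias d p.2 with
          | none => rfl
          | some v => simp [PySem.Dict.get?_insert_of_ne _ _ (Ne.symm hk)]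

lemma aloop_keys (d : PySem.Dict String String) (tbl : List (String × List String))
    (cells : PySem.Dict String String) (h : ∀ p ∈ tbl, p.1 ∈ cells.keys) :
    (aloop d tbl cells).keys = cells.keys := by
  induction tbl generalizing cells with
  | nil => rfl
  | cons p rest ih =>
    have hstep : aloop d (p :: rest) cells =
        aloop d rest (match pickAlias d p.2 with
          | some value => cells.insert p.1 value
          | none => cells) := rfl
    have hk : (match pickAlias d p.2 with
          | some value => cells.insert p.1 value
          | none => cells).keys = cells.keys := by
      cases hpk : pickAlias d p.2 with
      | none => rfl
      | some v =>
        exact PySem.Dict.keys_insert_of_contains _ _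
          ((PySem.Dict.contains_iff_mem_keys _ _).mpr (h p List.mem_cons_self))
    rw [hstep, ih _ (fun q hq => by rw [hk]; exact h q (List.mem_cons_of_mem _ hq)), hk]

-- ===== B-side characterization =====

lemma bstep_inv (kv : String × String) (cells : PySem.Dict String String)
    (best : PySem.Dict String Int) (B : String → Option (Int × String))
    (hb : ∀ c, best.get? c = (B c).map Prod.fst)
    (hc : ∀ c, cells.get? c = match B c with | some p => some p.2 | none => cellsB.get? c) :
    (∀ c, (bStep (cells, best) kv).2.get? c =
      ((match hitOf c kv with | some (i, v) => updMin (B c) i v | none => B c)).map Prod.fst) ∧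
    (∀ c, (bStep (cells, best) kv).1.get? c =
      match (match hitOf c kv with | some (i, v) => updMin (B c) i v | none => B c) with
      | some p => some p.2 | none => cellsB.get? c) := by
  by_cases hv : kv.2 = ""
  · constructor <;> intro c <;> simp only [bStep, hitOf, if_pos hv]
    · exact hb c
    · exact hc c
  · cases hr : aliasIndexB.get? kv.1 with
    | none =>
      constructor <;> intro c <;> simp only [bStep, hitOf, if_neg hv, hr]
      · exact hb c
      · exact hc c
    | some ci =>
      obtain ⟨c0, i⟩ := ci
      have hhit : ∀ c, hitOf c kv = if c0 = c then some (i, kv.2) else none := by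
        intro c; simp only [hitOf, if_neg hv, hr]
      cases hB0 : B c0 with
      | none =>
        have hb0 : best.get? c0 = none := by rw [hb c0, hB0]; rfl
        have hbs : bStep (cells, best) kv = (cells.insert c0 kv.2, best.insert c0 i) := by
          simp only [bStep, if_neg hv, hr, hb0]
        constructor <;> intro c <;> rw [hhit c] <;> by_cases hcc : c0 = c
        · subst hcc
          rw [hbs]
          simp [PySem.Dict.get?_insert_self, hB0, updMin]
        · rw [hbs]
          simp only [if_neg hcc]
          rw [PySem.Dict.get?_insert_of_ne _ _ (fun h => hcc h.symm)]
          exact hb c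
        · subst hcc
          rw [hbs]
          simp [PySem.Dict.get?_insert_self, hB0, updMin]
        · rw [hbs]
          simp only [if_neg hcc]
          rw [PySem.Dict.get?_insert_of_ne _ _ (fun h => hcc h.symm)]
          exact hc c
      | some p =>
        obtain ⟨j, w⟩ := p
        have hb0 : best.get? c0 = some j := by rw [hb c0, hB0]; rfl
        have hbs : bStep (cells, best) kv =
            if i < j then (cells.insert c0 kv.2, best.insert c0 i) else (cells, best) := by
          simp only [bStep, if_neg hv, hr, hb0]
        by_cases hij : i < j
        · rw [if_pos hij] at hbs
          constructor <;> intro c <;> rw [hhit c] <;> by_cases hcc : c0 = c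
          · subst hcc
            rw [hbs]
            simp [PySem.Dict.get?_insert_self, hB0, updMin, hij]
          · rw [hbs]
            simp only [if_neg hcc]
            rw [PySem.Dict.get?_insert_of_ne _ _ (fun h => hcc h.symm)]
            exact hb c
          · subst hcc
            rw [hbs]
            simp [PySem.Dict.get?_insert_self, hB0, updMin, hij]
          · rw [hbs]
            simp only [if_neg hcc]
            rw [PySem.Dict.get?_insert_of_ne _ _ (fun h => hcc h.symm)]
            exact hc c
        · rw [if_neg hij] at hbs
          constructor <;> intro c <;> rw [hhit c] <;> by_cases hcc : c0 = c
          · subst hcc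
            rw [hbs]
            simp [hB0, updMin, hij, hb0]
          · rw [hbs]
            simp only [if_neg hcc]
            exact hb c
          · subst hcc
            rw [hbs]
            simp [hB0, updMin, hij]
            rw [hc c0, hB0]
          · rw [hbs]
            simp only [if_neg hcc]
            exact hc c

lemma bfold_inv (l : List (String × String)) (cells : PySem.Dict String String)
    (best : PySem.Dict String Int) (B : String → Option (Int × String))
    (hb : ∀ c, best.get? c = (B c).map Prod.fst)
    (hc : ∀ c, cells.get? c = match B c with | some p => some p.2 | none => cellsB.get? c) :
    (∀ c, (l.foldl bStep (cells, best)).2.get? c = (bres l c (B c)).map Prod.fst) ∧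
    (∀ c, (l.foldl bStep (cells, best)).1.get? c =
      match bres l c (B c) with | some p => some p.2 | none => cellsB.get? c) := by
  induction l generalizing cells best B with
  | nil => exact ⟨hb, hc⟩
  | cons kv l ih =>
    have hstep := bstep_inv kv cells best B hb hc
    exact ih (bStep (cells, best) kv).1 (bStep (cells, best) kv).2
      (fun c => match hitOf c kv with | some (i, v) => updMin (B c) i v | none => B c)
      hstep.1 hstep.2

lemma bfold_keys (l : List (String × String)) (cells : PySem.Dict String String)
    (best : PySem.Dict String Int) (h : cells.keys = cellsLit.map Prod.fst) :
    (l.foldl bStep (cells, best)).1.keys = cellsLit.map Prod.fst := by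
  induction l generalizing cells best with
  | nil => exact h
  | cons kv l ih =>
    have hk : (bStep (cells, best) kv).1.keys = cellsLit.map Prod.fst := by
      by_cases hv : kv.2 = ""
      · simpa [bStep, hv] using h
      · cases hr : aliasIndexB.get? kv.1 with
        | none => simpa [bStep, hv, hr] using h
        | some ci =>
          obtain ⟨c0, i⟩ := ci
          have hm : (kv.1, (c0, i)) ∈ revRows := by
            have := PySem.Dict.mem_items_of_get?_eq_some _ hr
            rwa [aliasIndexB_items] at this
          have hc0 : c0 ∈ cells.keys := by
            rw [h]; exact (rev_sound _ hm).1
          have hcont := (PySem.Dict.contains_iff_mem_keys cells c0).mpr hc0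
          have hkeys : (bStep (cells, best) kv).1.keys = cells.keys := by
            simp only [bStep, if_neg hv, hr]
            cases best.get? c0 with
            | none => exact PySem.Dict.keys_insert_of_contains _ _ hcont
            | some j =>
              by_cases hij : i < j
              · simp only [if_pos hij]
                exact PySem.Dict.keys_insert_of_contains _ _ hcont
              · simp only [if_neg hij]
          rw [hkeys, h]
    exact ih _ _ hk

lemma bres_none (l : List (String × String)) (c : String) (acc : Option (Int × String))
    (h : bres l c acc = none) : acc = none ∧ ∀ kv ∈ l, hitOf c kv = none := by
  induction l generalizing acc with
  | nil => exact ⟨h, by simp⟩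
  | cons kv l ih =>
    rw [show bres (kv :: l) c acc =
      bres l c (match hitOf c kv with | some (i, v) => updMin acc i v | none => acc) from rfl] at h
    cases hh : hitOf c kv with
    | none =>
      rw [hh] at h
      obtain ⟨h1, h2⟩ := ih _ h
      refine ⟨h1, fun x hx => ?_⟩
      rcases List.mem_cons.mp hx with rfl | hx
      · exact hh
      · exact h2 x hx
    | some iv =>
      obtain ⟨i, v⟩ := iv
      simp only [hh] at h
      obtain ⟨h1, h2⟩ := ih _ h
      exfalso
      cases acc with
      | none => simp [updMin] at h1
      | some p =>
        obtain ⟨j, w⟩ := p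
        by_cases hij : i < j <;> simp [updMin, hij] at h1

lemma bres_some (l : List (String × String)) (c : String) (acc : Option (Int × String))
    (p : Int × String) (h : bres l c acc = some p) :
    (acc = some p ∨ ∃ kv ∈ l, hitOf c kv = some p) ∧
    (∀ kv ∈ l, ∀ q, hitOf c kv = some q → p.1 ≤ q.1) ∧
    (∀ q, acc = some q → p.1 ≤ q.1) := by
  induction l generalizing acc with
  | nil =>
    have h' : acc = some p := h
    refine ⟨Or.inl h', by simp, fun q hq => ?_⟩
    rw [h'] at hq
    injection hq with hq
    rw [hq]
  | cons kv l ih =>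
    rw [show bres (kv :: l) c acc =
      bres l c (match hitOf c kv with | some (i, v) => updMin acc i v | none => acc) from rfl] at h
    cases hh : hitOf c kv with
    | none =>
      rw [hh] at h
      obtain ⟨hmem, hmin, hacc⟩ := ih _ h
      refine ⟨?_, fun x hx q hq => ?_, hacc⟩
      · rcases hmem with h' | ⟨x, hx, hxh⟩
        · exact Or.inl h'
        · exact Or.inr ⟨x, List.mem_cons_of_mem _ hx, hxh⟩
      · rcases List.mem_cons.mp hx with rfl | hx
        · rw [hh] at hq; simp at hq
        · exact hmin x hx q hq
    | some iv =>
      obtain ⟨i, v⟩ := iv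
      simp only [hh] at h
      obtain ⟨hmem, hmin, hacc⟩ := ih _ h
      have hpi : p.1 ≤ i ∧ ∀ q, acc = some q → p.1 ≤ q.1 := by
        cases acc with
        | none => exact ⟨hacc (i, v) rfl, fun q hq => by simp at hq⟩
        | some pr =>
          obtain ⟨j, w⟩ := pr
          by_cases hij : i < j
          · have h1 : p.1 ≤ i := hacc (i, v) (by simp [updMin, hij])
            refine ⟨h1, fun q hq => ?_⟩
            injection hq with hq
            rw [← hq]
            omega
          · have h1 : p.1 ≤ j := hacc (j, w) (by simp [updMin, hij])
            refine ⟨by omega, fun q hq => ?_⟩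
            injection hq with hq
            rw [← hq]
            exact h1
      refine ⟨?_, fun x hx q hq => ?_, hpi.2⟩
      · rcases hmem with h' | ⟨x, hx, hxh⟩
        · cases acc with
          | none =>
            refine Or.inr ⟨kv, List.mem_cons_self, ?_⟩
            rw [hh]
            simpa [updMin] using h'
          | some pr =>
            obtain ⟨j, w⟩ := pr
            by_cases hij : i < j
            · simp only [updMin, if_pos hij] at h'
              exact Or.inr ⟨kv, List.mem_cons_self, by rw [hh, h']⟩
            · simp only [updMin, if_neg hij] at h'
              exact Or.inl h'
        · exact Or.inr ⟨x, List.mem_cons_of_mem _ hx, hxh⟩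
      · rcases List.mem_cons.mp hx with rfl | hx
        · rw [hh] at hq
          injection hq with hq
          rw [← hq]
          exact hpi.1
        · exact hmin x hx q hq

-- ===== pickAlias characterization =====

lemma pickAlias_eq_none (d : PySem.Dict String String) (as : List String)
    (h : ∀ a ∈ as, d.getD (pyNormCol a) "" = "") : pickAlias d as = none := by
  induction as with
  | nil => rfl
  | cons a rest ih =>
    have ha := h a List.mem_cons_self
    simp only [pickAlias, ha]
    simp only [ne_eq, not_true_eq_false, if_neg]
    exact ih fun a' ha' => h _ (List.mem_cons_of_mem _ ha')

lemma pickAlias_eq_some (d : PySem.Dict String String) (as : List String) (j : Nat)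
    (hj : j < as.length) (hne : d.getD (pyNormCol (as.getD j "")) "" ≠ "")
    (hbefore : ∀ j' < j, d.getD (pyNormCol (as.getD j' "")) "" = "") :
    pickAlias d as = some (d.getD (pyNormCol (as.getD j "")) "") := by
  induction as generalizing j with
  | nil => simp at hj
  | cons a rest ih =>
    cases j with
    | zero =>
      simp only [List.getD_cons_zero] at hne ⊢
      simp only [pickAlias, if_pos hne]
    | succ j' =>
      have h0 : d.getD (pyNormCol a) "" = "" := by
        simpa using hbefore 0 (Nat.succ_pos _)
      simp only [List.getD_cons_succ] at hne ⊢
      simp only [pickAlias, h0]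
      simp only [ne_eq, not_true_eq_false, if_neg]
      exact ih j' (by simpa using hj) hne
        (fun j'' hj'' => by simpa using hbefore (j'' + 1) (by omega))

-- ===== the exchange lemma =====

set_option maxRecDepth 100000 in
set_option maxHeartbeats 1000000 in
lemma bres_eq_pick (d : PySem.Dict String String) (hnd : d.keys.Nodup)
    (c : String) (as : List String) (hmem : (c, as) ∈ sourceTableAliases) :
    (bres d.items c none).map Prod.snd = pickAlias d as := by
  have hget : ∀ (k : String), d.getD k "" ≠ "" → d.get? k = some (d.getD k "") := by
    intro k h
    rw [PySem.Dict.getD_eq_get?_getD] at h ⊢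
    cases hk : d.get? k with
    | none => rw [hk] at h; simp at h
    | some v => simp [hk]
  cases hbr : bres d.items c none with
  | none =>
    obtain ⟨-, hall⟩ := bres_none _ _ _ hbr
    suffices h2 : pickAlias d as = none by rw [h2]; rfl
    apply pickAlias_eq_none
    intro a ha
    by_contra hne
    obtain ⟨j, hj, rfl⟩ := List.mem_iff_getElem.mp ha
    rw [← List.getD_eq_getElem as "" hj] at hne
    have hv := hget _ hne
    have hmemit := PySem.Dict.mem_items_of_get?_eq_some _ hv
    have hhit : hitOf c (pyNormCol (as.getD j ""), d.getD (pyNormCol (as.getD j "")) "") =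
        some ((j : Int), d.getD (pyNormCol (as.getD j "")) "") := by
      unfold hitOf
      rw [if_neg hne]
      rw [rev_complete _ hmem j (List.mem_range.mpr hj)]
      exact if_pos rfl
    have hcontra := hall _ hmemit
    rw [hhit] at hcontra
    exact absurd hcontra (Option.some_ne_none _)
  | some p =>
    obtain ⟨i, v⟩ := p
    obtain ⟨hmem', hmin, -⟩ := bres_some _ _ _ _ hbr
    rcases hmem' with h' | ⟨kv, hkv, hhit⟩
    · exact absurd h' (by simp)
    have hdec : kv.2 ≠ "" ∧ aliasIndexB.get? kv.1 = some (c, i) ∧ v = kv.2 := by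
      by_cases hkv2 : kv.2 = ""
      · simp [hitOf, hkv2] at hhit
      · cases hr : aliasIndexB.get? kv.1 with
        | none => simp [hitOf, hkv2, hr] at hhit
        | some ci =>
          obtain ⟨c', i'⟩ := ci
          by_cases hc' : c' = c
          · simp only [hitOf, if_neg hkv2, hr, if_pos hc'] at hhit
            injection hhit with hhit
            have h1 : i' = i := congrArg Prod.fst hhit
            have h2 : kv.2 = v := congrArg Prod.snd hhit
            exact ⟨hkv2, by simp [hr, hc', h1], h2.symm⟩
          · simp [hitOf, hkv2, hr, hc'] at hhit
    obtain ⟨hkv2, hr, rfl⟩ := hdec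
    have hrl : (kv.1, (c, i)) ∈ revRows := by
      have := PySem.Dict.mem_items_of_get?_eq_some _ hr
      rwa [aliasIndexB_items] at this
    obtain ⟨j, hjr, hji, hkey⟩ := rev_decode _ hrl _ hmem rfl
    simp only at hji hkey hjr
    have hj : j < as.length := List.mem_range.mp hjr
    have hq : d.get? kv.1 = some kv.2 := PySem.Dict.get?_of_mem_items _ hkv hnd
    have hgd : d.getD (pyNormCol (as.getD j "")) "" = kv.2 := by
      rw [← hkey, PySem.Dict.getD_eq_get?_getD, hq]
      rfl
    have hbef : ∀ j' < j, d.getD (pyNormCol (as.getD j' "")) "" = "" := by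
      intro j' hj'
      by_contra hne
      have hv' := hget _ hne
      have hmemit := PySem.Dict.mem_items_of_get?_eq_some _ hv'
      have hhit' : hitOf c (pyNormCol (as.getD j' ""), d.getD (pyNormCol (as.getD j' "")) "") =
          some ((j' : Int), d.getD (pyNormCol (as.getD j' "")) "") := by
        unfold hitOf
        rw [if_neg hne]
        rw [rev_complete _ hmem j' (List.mem_range.mpr (by omega : j' < as.length))]
        exact if_pos rfl
      have hle := hmin _ hmemit _ hhit'
      simp only at hle
      omega
    rw [pickAlias_eq_some d as j hj (by rw [hgd]; exact hkv2) hbef, hgd]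
    rfl

-- ===== glue =====

lemma normRaw_nodup (raw : List (String × String)) : (normRawOf raw).keys.Nodup := by
  exact PySem.Dict.nodup_keys_foldl_insert_key raw (fun kv => pyNormCol kv.1)
    (fun _ kv => PySem.Str.strip kv.2) PySem.Dict.empty PySem.Dict.nodup_keys_empty

lemma glue_get? (raw : List (String × String)) (k : String) :
    (aloop (normRawOf raw) sourceTableAliases cellsInit).get? k =
      (((normRawOf raw).items.foldl bStep (cellsB, PySem.Dict.empty)).1).get? k := by
  have hnd := normRaw_nodup raw
  have hB := bfold_inv (normRawOf raw).items cellsB PySem.Dict.empty (fun _ => none)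
    (fun c => by rw [PySem.Dict.get?_empty]; rfl) (fun c => rfl)
  rw [aloop_get? _ _ _ tbl_nodup k, hB.2 k]
  cases hf : tblFind sourceTableAliases k with
  | none =>
    cases hbr : bres (normRawOf raw).items k none with
    | none => exact cellsB_get?_eq k |>.symm
    | some p =>
      exfalso
      obtain ⟨i, v⟩ := p
      obtain ⟨hmem', -, -⟩ := bres_some _ _ _ _ hbr
      rcases hmem' with h' | ⟨kv, hkv, hhit⟩
      · simp at h'
      have hex : ∃ i', aliasIndexB.get? kv.1 = some (k, i') := by
        by_cases hkv2 : kv.2 = ""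
        · simp [hitOf, hkv2] at hhit
        · cases hr : aliasIndexB.get? kv.1 with
          | none => simp [hitOf, hkv2, hr] at hhit
          | some ci =>
            obtain ⟨c', i'⟩ := ci
            by_cases hc' : c' = k
            · exact ⟨i', by rw [hc']⟩
            · simp [hitOf, hkv2, hr, hc'] at hhit
      obtain ⟨i', hr⟩ := hex
      have hrl : (kv.1, (k, i')) ∈ revRows := by
        have := PySem.Dict.mem_items_of_get?_eq_some _ hr
        rwa [aliasIndexB_items] at this
      exact (rev_sound _ hrl).2 hf
  | some as =>
    have hmem := tblFind_mem hf
    have hpick := bres_eq_pick (normRawOf raw) hnd k as hmem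
    show (match pickAlias (normRawOf raw) as with
          | some v => some v | none => cellsInit.get? k) =
        (match bres (normRawOf raw).items k none with
          | some p => some p.2 | none => cellsB.get? k)
    rw [← hpick]
    cases hbr : bres (normRawOf raw).items k none with
    | none => exact cellsB_get?_eq k |>.symm
    | some p => rfl

-- ===== VERDICT (by name: the statement is the Claim_ definition above) =====
theorem canonical_source_cells_py_spec : Claim_equal_canonical_source_cells_py := by
  intro raw _
  show canonical_source_cells_py raw = canonical_source_cells_py_alt raw
  have hA : canonical_source_cells_py raw =
      (aloop (normRawOf raw) sourceTableAliases cellsInit).items := rfl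
  have hB : canonical_source_cells_py_alt raw =
      (((normRawOf raw).items.foldl bStep (cellsB, PySem.Dict.empty)).1).items := rfl
  rw [hA, hB]
  have hkA : (aloop (normRawOf raw) sourceTableAliases cellsInit).keys = cellsLit.map Prod.fst := by
    rw [aloop_keys _ _ _ (fun p hp => by rw [cellsInit_keys]; exact tbl_keys_in_cells p hp),
      cellsInit_keys]
  have hkB := bfold_keys (normRawOf raw).items cellsB PySem.Dict.empty cellsB_keys
  rw [PySem.Dict.items_eq_map_keys _ (by rw [hkA]; exact cells_keys_nodup) "",
    PySem.Dict.items_eq_map_keys _ (by rw [hkB]; exact cells_keys_nodup) "", hkA, hkB]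
  apply List.map_congr_left
  intro k hk
  exact congrArg (Prod.mk k)
    (by rw [PySem.Dict.getD_eq_get?_getD, PySem.Dict.getD_eq_get?_getD, glue_get? raw k])
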